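-- pv_equiv track=rewrite | github.com/joergnick/nonlinearCQ | cqtoolbox.py | createFFTLengths
-- ===== SOURCE A (Python) =====
-- def createFFTLengths(N):
--     lengths = [1]
--     it = 1
--     while len(lengths)<=N:
--         lengths.append( 2**it)
--         lengths.extend(lengths[:-1][::-1])
--         it = it+1
--     return lengths
-- ===== SOURCE B (Python) =====
-- def createFFTLengths(N):
--     L = 1
--     while L <= N:
--         L = 2 * L + 1
--     result = []
--     for i in range(1, L + 1):
--         p = 1
--         m = i
--         while m % 2 == 0:
--             p *= 2
--             m //= 2
--         result.append(p)
--     return result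
-- ===== Notes on version B (the rewrite author's own statement) =====
-- stated objective: alternative
-- what changed: Replaces the mirror-doubling list construction (append the next power of two, then extend with the reversed prefix) by first computing the final length with the same doubling test and then producing each element independently as the largest power of two dividing its one-based index.
import Mathlib
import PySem

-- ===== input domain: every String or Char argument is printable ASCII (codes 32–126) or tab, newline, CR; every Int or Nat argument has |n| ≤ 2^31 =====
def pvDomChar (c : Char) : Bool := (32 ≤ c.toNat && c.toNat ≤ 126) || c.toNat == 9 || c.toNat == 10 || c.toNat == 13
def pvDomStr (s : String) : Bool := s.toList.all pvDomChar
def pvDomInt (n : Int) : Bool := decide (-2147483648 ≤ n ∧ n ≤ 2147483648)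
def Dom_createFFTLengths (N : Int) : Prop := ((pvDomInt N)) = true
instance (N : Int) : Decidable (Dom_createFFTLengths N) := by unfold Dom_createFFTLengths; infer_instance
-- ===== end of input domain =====

-- B replaces A's mirror-doubling list construction by the same length-doubling test followed by a
-- per-element computation (largest power of two dividing the 1-based index); alternative algorithm, same output.

-- termination lemmas for the loop ports (cited by name in decreasing_by)
theorem pv_decA (N : Int) (lengths : List Int) (x : Int) (h : (lengths.length : Int) ≤ N) :
    (N + 1 - (((lengths ++ [x]) ++
      (PySem.List.slice (lengths ++ [x]) none (some (-1))).reverse).length : Int)).toNat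
      < (N + 1 - (lengths.length : Int)).toNat := by
  rw [PySem.List.slice_to_neg_one, List.dropLast_concat]
  simp only [List.length_append, List.length_reverse, List.length_cons, List.length_nil]
  omega

theorem pv_decL (N : Int) (L : Nat) (h : (L : Int) ≤ N) :
    (N + 1 - ((2 * L + 1 : Nat) : Int)).toNat < (N + 1 - (L : Int)).toNat := by omega

theorem pv_decS (m : Nat) (h0 : m ≠ 0) : m / 2 < m := by omega

-- ===== PORT A =====
-- while len(lengths) <= N: lengths.append(2**it); lengths.extend(lengths[:-1][::-1]); it += 1
-- lengths[:-1] is PySem.List.slice _ none (some (-1)); [::-1] is list reversal (PySem.List.slice?_none_none_neg_one)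
def createFFTLengths_loop (N : Int) (lengths : List Int) (it : Nat) : List Int :=
  if (lengths.length : Int) ≤ N then
    createFFTLengths_loop N
      ((lengths ++ [(2:Int) ^ it]) ++
        (PySem.List.slice (lengths ++ [(2:Int) ^ it]) none (some (-1))).reverse)
      (it + 1)
  else lengths
termination_by (N + 1 - lengths.length).toNat
decreasing_by exact pv_decA N lengths _ (by assumption)

def createFFTLengths (N : Int) : List Int := createFFTLengths_loop N [1] 1

-- ===== PORT B =====
-- L = 1; while L <= N: L = 2*L + 1   (L is always ≥ 1, carried as a Nat)
def altLenLoop (N : Int) (L : Nat) : Nat :=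
  if (L : Int) ≤ N then altLenLoop N (2 * L + 1) else L
termination_by (N + 1 - L).toNat
decreasing_by exact pv_decL N L (by assumption)

-- p = 1; m = i; while m % 2 == 0: p *= 2; m //= 2   ('m ≠ 0' is a totality guard: every i here is ≥ 1)
def stripLoop (p : Int) (m : Nat) : Int :=
  if m % 2 = 0 ∧ m ≠ 0 then stripLoop (2 * p) (m / 2) else p
termination_by m
decreasing_by exact pv_decS m (by simp_all)

def createFFTLengths_alt (N : Int) : List Int :=
  (PySem.List.pyRange 1 ((altLenLoop N 1 : Int) + 1) 1).map (fun i => stripLoop 1 i.toNat)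

-- ===== PRECONDITION & SPEC =====
def Spec_createFFTLengths (N : Int) (out : List Int) : Prop := out = createFFTLengths_alt N
instance (N : Int) (out : List Int) : Decidable (Spec_createFFTLengths N out) := by unfold Spec_createFFTLengths; infer_instance

-- ===== CLAIM (what is proved, stated in full; the proofs are below) =====
def Claim_equal_createFFTLengths : Prop := ∀ (N : Int), Dom_createFFTLengths N → Spec_createFFTLengths N (createFFTLengths N)

-- ===== LEMMAS AND PROOFS =====

-- the ruler list A builds: pvR k has length 2^(k+1) - 1
def pvR : Nat → List Int
  | 0 => [1]
  | k + 1 => (pvR k ++ [(2:Int) ^ (k + 1)]) ++ (pvR k).reverse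

theorem pvR_length (k : Nat) : (pvR k).length = 2 ^ (k + 1) - 1 := by
  induction k with
  | zero => rfl
  | succ k ih =>
    have h1 : 1 ≤ 2 ^ (k + 1) := Nat.one_le_two_pow
    have h2 : (2:Nat) ^ (k + 1 + 1) = 2 ^ (k + 1) * 2 := pow_succ 2 (k + 1)
    simp only [pvR, List.length_append, List.length_reverse, List.length_cons,
      List.length_nil, ih]
    omega

theorem pvR_length_int (k : Nat) : ((pvR k).length : Int) = 2 ^ (k + 1) - 1 := by
  have h1 : 1 ≤ 2 ^ (k + 1) := Nat.one_le_two_pow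
  rw [pvR_length]
  push_cast [h1]
  ring

-- the number of doubling steps both loops perform, as a function of N and the current step k
def pvKf (N : Int) (k : Nat) : Nat :=
  if (2:Int) ^ (k + 1) - 1 ≤ N then pvKf N (k + 1) else k
termination_by (N + 2 - 2 ^ (k + 1)).toNat
decreasing_by
  have h1 : (1:Int) ≤ 2 ^ (k + 1) := one_le_pow₀ (by norm_num)
  omega

-- both loops, run from step k, land on the step count pvKf N k
theorem pv_loops (N : Int) : ∀ (t k : Nat), (N + 2 - 2 ^ (k + 1)).toNat ≤ t →
    (createFFTLengths_loop N (pvR k) (k + 1) = pvR (pvKf N k)) ∧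
    (altLenLoop N (2 ^ (k + 1) - 1) = 2 ^ (pvKf N k + 1) - 1) := by
  intro t
  induction t with
  | zero =>
    intro k hk
    have h1 : (1:Int) ≤ 2 ^ (k + 1) := one_le_pow₀ (by norm_num)
    have hcond : ¬ ((2:Int) ^ (k + 1) - 1 ≤ N) := by omega
    have hlen : ((pvR k).length : Int) = 2 ^ (k + 1) - 1 := pvR_length_int k
    have hnat : (((2 ^ (k + 1) - 1 : Nat)) : Int) = (2:Int) ^ (k + 1) - 1 := by
      push_cast [Nat.one_le_two_pow]; ring
    rw [pvKf.eq_def, if_neg hcond]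
    constructor
    · rw [createFFTLengths_loop.eq_def, if_neg (by rw [hlen]; exact hcond)]
    · rw [altLenLoop.eq_def, if_neg (by rw [hnat]; exact hcond)]
  | succ t ih =>
    intro k hk
    have h1 : (1:Int) ≤ 2 ^ (k + 1) := one_le_pow₀ (by norm_num)
    have h2 : (2:Int) ^ (k + 1 + 1) = 2 ^ (k + 1) * 2 := pow_succ 2 (k + 1)
    have hlen : ((pvR k).length : Int) = 2 ^ (k + 1) - 1 := pvR_length_int k
    have hnat : (((2 ^ (k + 1) - 1 : Nat)) : Int) = (2:Int) ^ (k + 1) - 1 := by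
      push_cast [Nat.one_le_two_pow]; ring
    by_cases h : (2:Int) ^ (k + 1) - 1 ≤ N
    · have hrec := ih (k + 1) (by omega)
      rw [pvKf.eq_def, if_pos h]
      constructor
      · rw [createFFTLengths_loop.eq_def, if_pos (by rw [hlen]; exact h)]
        have hstep : (pvR k ++ [(2:Int) ^ (k + 1)]) ++
            (PySem.List.slice (pvR k ++ [(2:Int) ^ (k + 1)]) none (some (-1))).reverse
            = pvR (k + 1) := by
          rw [PySem.List.slice_to_neg_one, List.dropLast_concat, pvR]
        rw [hstep]
        exact hrec.1
      · rw [altLenLoop.eq_def, if_pos (by rw [hnat]; exact h)]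
        have h3 : 2 * (2 ^ (k + 1) - 1) + 1 = 2 ^ (k + 1 + 1) - 1 := by
          have h4 : (2:Nat) ^ (k + 1 + 1) = 2 ^ (k + 1) * 2 := pow_succ 2 (k + 1)
          have h5 : 1 ≤ (2:Nat) ^ (k + 1) := Nat.one_le_two_pow
          omega
        rw [h3]
        exact hrec.2
    · rw [pvKf.eq_def, if_neg h]
      constructor
      · rw [createFFTLengths_loop.eq_def, if_neg (by rw [hlen]; exact h)]
      · rw [altLenLoop.eq_def, if_neg (by rw [hnat]; exact h)]

-- the per-element loop computes the largest power of two dividing m (call it pvG)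
def pvG (m : Nat) : Int := stripLoop 1 m

theorem strip_odd (p : Int) (m : Nat) (h : m % 2 = 1) : stripLoop p m = p := by
  rw [stripLoop.eq_def]
  simp [h]

theorem strip_even (p : Int) (m : Nat) (h : m % 2 = 0) (h0 : m ≠ 0) :
    stripLoop p m = stripLoop (2 * p) (m / 2) := by
  rw [stripLoop.eq_def]
  simp [h, h0]

theorem strip_zero (p : Int) : stripLoop p 0 = p := by
  rw [stripLoop.eq_def]
  simp

theorem strip_acc (m : Nat) : ∀ p : Int, stripLoop p m = p * stripLoop 1 m := by
  induction m using Nat.strong_induction_on with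
  | _ m ih =>
    intro p
    rcases Nat.mod_two_eq_zero_or_one m with h | h
    · by_cases h0 : m = 0
      · subst h0
        rw [strip_zero, strip_zero]
        ring
      · rw [strip_even p m h h0, strip_even 1 m h h0,
          ih (m / 2) (by omega) (2 * p), ih (m / 2) (by omega) (2 * 1)]
        ring
    · rw [strip_odd p m h, strip_odd 1 m h]
      ring

theorem pvG_even (m : Nat) (h : m % 2 = 0) (h0 : m ≠ 0) : pvG m = 2 * pvG (m / 2) := by
  unfold pvG
  rw [strip_even 1 m h h0, strip_acc (m / 2) (2 * 1)]
  norm_num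

theorem pvG_pow (m : Nat) : pvG (2 ^ m) = 2 ^ m := by
  induction m with
  | zero =>
    unfold pvG
    norm_num [strip_odd 1 1 rfl]
  | succ m ih =>
    have h2 : (2:Nat) ^ (m + 1) = 2 ^ m * 2 := pow_succ 2 m
    have h1 : 1 ≤ (2:Nat) ^ m := Nat.one_le_two_pow
    have h : 2 ^ (m + 1) % 2 = 0 := by omega
    have h0 : (2:Nat) ^ (m + 1) ≠ 0 := by positivity
    have hd : 2 ^ (m + 1) / 2 = 2 ^ m := by omega
    rw [pvG_even _ h h0, hd, ih, pow_succ]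
    ring

theorem pvG_add_pow (j : Nat) : ∀ m : Nat, 1 ≤ m → 1 ≤ j → j < 2 ^ m →
    pvG (2 ^ m + j) = pvG j := by
  induction j using Nat.strong_induction_on with
  | _ j ih =>
    intro m hm hj hjm
    have hpow2 : 2 ^ m % 2 = 0 := by
      obtain ⟨m', rfl⟩ : ∃ m', m = m' + 1 := ⟨m - 1, by omega⟩
      have : (2:Nat) ^ (m' + 1) = 2 ^ m' * 2 := pow_succ 2 m'
      omega
    rcases Nat.mod_two_eq_zero_or_one j with h | h
    · have hm2 : 2 ≤ m := by
        by_contra hc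
        have hm1 : m = 1 := by omega
        subst hm1
        norm_num at hjm
        omega
      have hsum : (2 ^ m + j) % 2 = 0 := by omega
      have hs0 : 2 ^ m + j ≠ 0 := by omega
      have hpow' : 2 ^ m = 2 ^ (m - 1) * 2 := by
        have h5 := pow_succ 2 (m - 1)
        have hm1 : m - 1 + 1 = m := by omega
        rw [hm1] at h5
        omega
      have hd : (2 ^ m + j) / 2 = 2 ^ (m - 1) + j / 2 := by omega
      rw [pvG_even _ hsum hs0, hd,
        ih (j / 2) (by omega) (m - 1) (by omega) (by omega) (by omega),
        ← pvG_even j h (by omega)]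
    · have hodd : (2 ^ m + j) % 2 = 1 := by omega
      unfold pvG
      rw [strip_odd 1 _ hodd, strip_odd 1 j h]

theorem pvG_sub_pow (j : Nat) : ∀ m : Nat, 1 ≤ m → 1 ≤ j → j < 2 ^ m →
    pvG (2 ^ m - j) = pvG j := by
  induction j using Nat.strong_induction_on with
  | _ j ih =>
    intro m hm hj hjm
    have hpow2 : 2 ^ m % 2 = 0 := by
      obtain ⟨m', rfl⟩ : ∃ m', m = m' + 1 := ⟨m - 1, by omega⟩
      have : (2:Nat) ^ (m' + 1) = 2 ^ m' * 2 := pow_succ 2 m'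
      omega
    rcases Nat.mod_two_eq_zero_or_one j with h | h
    · have hm2 : 2 ≤ m := by
        by_contra hc
        have hm1 : m = 1 := by omega
        subst hm1
        norm_num at hjm
        omega
      have hsub : (2 ^ m - j) % 2 = 0 := by omega
      have hs0 : 2 ^ m - j ≠ 0 := by omega
      have hpow' : 2 ^ m = 2 ^ (m - 1) * 2 := by
        have h5 := pow_succ 2 (m - 1)
        have hm1 : m - 1 + 1 = m := by omega
        rw [hm1] at h5
        omega
      have hd : (2 ^ m - j) / 2 = 2 ^ (m - 1) - j / 2 := by omega
      rw [pvG_even _ hsub hs0, hd,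
        ih (j / 2) (by omega) (m - 1) (by omega) (by omega) (by omega),
        ← pvG_even j h (by omega)]
    · have hodd : (2 ^ m - j) % 2 = 1 := by omega
      unfold pvG
      rw [strip_odd 1 _ hodd, strip_odd 1 j h]

-- B's element list for length n
def pvM (n : Nat) : List Int := (List.range n).map (fun j => pvG (j + 1))

theorem pvM_palindrome (m : Nat) (hm : 1 ≤ m) :
    (pvM (2 ^ m - 1)).reverse = pvM (2 ^ m - 1) := by
  have h1 : 1 ≤ 2 ^ m := Nat.one_le_two_pow
  apply List.ext_getElem
  · simp [pvM]
  · intro i h1' h2'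
    simp only [pvM, List.length_reverse, List.length_map, List.length_range] at h1' h2'
    simp only [List.getElem_reverse, pvM, List.getElem_map, List.getElem_range,
      List.length_map, List.length_range]
    have hval : 2 ^ m - 1 - 1 - i + 1 = 2 ^ m - (i + 1) := by omega
    rw [hval, pvG_sub_pow (i + 1) m hm (by omega) (by omega)]

theorem pvM_R (k : Nat) : pvM (2 ^ (k + 1) - 1) = pvR k := by
  induction k with
  | zero =>
    have hg : pvG 1 = 1 := by
      unfold pvG
      exact strip_odd 1 1 rfl
    norm_num [pvM, pvR, List.range_succ, hg]
  | succ k ih =>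
    have ih' : List.map (fun j => pvG (j + 1)) (List.range (2 ^ (k + 1) - 1)) = pvR k := ih
    have h1 : 1 ≤ (2:Nat) ^ (k + 1) := Nat.one_le_two_pow
    have h2 : (2:Nat) ^ (k + 1 + 1) = 2 ^ (k + 1) * 2 := pow_succ 2 (k + 1)
    have hsplit : 2 ^ (k + 1 + 1) - 1 = (2 ^ (k + 1) - 1) + 1 + (2 ^ (k + 1) - 1) := by omega
    have hpal : (pvR k).reverse = pvR k := by
      rw [← ih]
      exact pvM_palindrome (k + 1) (by omega)
    unfold pvM
    rw [hsplit, List.range_add, List.map_append, List.range_succ, List.map_append,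
      List.map_map]
    simp only [Function.comp_def, List.map_cons, List.map_nil]
    have hmid : 2 ^ (k + 1) - 1 + 1 = 2 ^ (k + 1) := by omega
    rw [hmid, pvG_pow]
    have htail : List.map (fun x => pvG (2 ^ (k + 1) + x + 1)) (List.range (2 ^ (k + 1) - 1))
        = pvR k := by
      rw [← ih']
      apply List.map_congr_left
      intro x hx
      simp only [List.mem_range] at hx
      have hrw : 2 ^ (k + 1) + x + 1 = 2 ^ (k + 1) + (x + 1) := by omega
      rw [hrw, pvG_add_pow (x + 1) (k + 1) (by omega) (by omega) (by omega)]
    rw [htail, ih', pvR, hpal]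

theorem alt_eq_M (N : Int) : createFFTLengths_alt N = pvM (altLenLoop N 1) := by
  unfold createFFTLengths_alt pvM
  rw [PySem.List.pyRange_one]
  have h : ((altLenLoop N 1 : Int) + 1 - 1).toNat = altLenLoop N 1 := by omega
  rw [h, List.map_map]
  apply List.map_congr_left
  intro x hx
  simp only [Function.comp_def]
  have hx1 : ((1:Int) + (x : Int)).toNat = x + 1 := by omega
  rw [hx1]
  rfl

-- ===== VERDICT (by name: the statement is the Claim_ definition above) =====
theorem createFFTLengths_spec : Claim_equal_createFFTLengths := by
  intro N _
  unfold Spec_createFFTLengths createFFTLengths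
  have hmain := pv_loops N (N + 2 - 2 ^ (0 + 1)).toNat 0 le_rfl
  have hA : createFFTLengths_loop N [1] 1 = pvR (pvKf N 0) := hmain.1
  have hB : createFFTLengths_alt N = pvR (pvKf N 0) := by
    rw [alt_eq_M]
    have h0 : (2:Nat) ^ (0 + 1) - 1 = 1 := by norm_num
    have h1 : altLenLoop N 1 = 2 ^ (pvKf N 0 + 1) - 1 := by
      rw [← h0]
      exact hmain.2
    rw [h1, pvM_R]
  rw [hA, hB]
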